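-- pv_equiv track=rewrite | github.com/yukondude/cookiecutter-cli-mit-fixins | mitfixins/cli_helper.py | is_option_switch_in_arguments
-- ===== SOURCE A (Python) =====
-- def is_option_switch_in_arguments(switches, short_switches, arguments):
--     """ Return True if the given option switches appear on the command line. This is,
--         admittedly, a bit of a hackish re-implementation of the Click argument parser.
--     """
--     for argument in [a for a in arguments if a.startswith("-")]:
--         for switch in switches:
--             if argument.startswith(switch):
--                 # Long switches
--                 return True
--
--             if len(switch) == 2 and len(argument) >= 2 and argument[1] != "-":
--                 # Short switches
--                 for char in argument[1:]:
--                     if char not in short_switches: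
--                         # Hit a character that's not one of the recognized short
--                         # switches so it must be part of an argument value.
--                         break
--
--                     if char == switch[1]:
--                         return True
--
--     return False
-- ===== SOURCE B (Python) =====
-- def is_option_switch_in_arguments(switches, short_switches, arguments):
--     """ Return True if the given option switches appear on the command line. """
--     for argument in arguments:
--         if not argument.startswith("-"):
--             continue
--         # Long switches: any switch that is a prefix of the argument.
--         if any(argument.startswith(switch) for switch in switches):
--             return True
--         # Short switches: build ONCE the set of characters in the longest prefix
--         # of argument[1:] made of recognized short-switch characters, then test
--         # every 2-character switch against it.
--         if len(argument) >= 2 and argument[1] != "-":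
--             valid = set()
--             for char in argument[1:]:
--                 if char not in short_switches:
--                     break
--                 valid.add(char)
--             if any(len(switch) == 2 and switch[1] in valid for switch in switches):
--                 return True
--     return False
-- ===== Notes on version B (the rewrite author's own statement) =====
-- stated objective: alternative
-- what changed: Per argument, B replaces A's nested per-switch loops (which rescan the argument's characters for every switch) by one prefix-set built once from the argument's valid short-switch characters, followed by two flat any() passes over the switches (long-prefix test, then membership of each 2-char switch's letter in the set).
import Mathlib
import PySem

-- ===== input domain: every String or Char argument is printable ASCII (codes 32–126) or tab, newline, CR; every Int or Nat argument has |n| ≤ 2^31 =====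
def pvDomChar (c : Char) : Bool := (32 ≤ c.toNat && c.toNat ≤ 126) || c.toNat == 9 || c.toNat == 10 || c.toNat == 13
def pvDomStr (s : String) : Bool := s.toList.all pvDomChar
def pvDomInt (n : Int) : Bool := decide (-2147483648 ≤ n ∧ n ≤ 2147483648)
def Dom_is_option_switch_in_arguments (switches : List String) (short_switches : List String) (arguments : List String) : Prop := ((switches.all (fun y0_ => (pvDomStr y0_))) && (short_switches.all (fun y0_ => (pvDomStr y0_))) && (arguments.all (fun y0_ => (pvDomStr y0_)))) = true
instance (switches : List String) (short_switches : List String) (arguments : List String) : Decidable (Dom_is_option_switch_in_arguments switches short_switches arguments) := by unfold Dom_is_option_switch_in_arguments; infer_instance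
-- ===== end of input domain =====

-- B replaces A's nested per-switch character rescans by one per-argument valid-prefix set and
-- two flat any-passes over the switches (objective: alternative decomposition, same results).

-- ===== PORT A =====
-- inner 'for char in argument[1:]' with break; returns True iff switch[1] is hit before a
-- character outside short_switches ('char in short_switches' is 1-char-string list membership)
def pvA_charLoop (short_switches : List String) (sw1 : Char) : List Char → Bool
  | [] => false
  | c :: cs =>
    if ¬ (short_switches.contains (String.ofList [c])) then false
    else if String.ofList [c] = String.ofList [sw1] then true
    else pvA_charLoop short_switches sw1 cs

-- middle 'for switch in switches' loop of A, for one argument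
def pvA_swLoop (short_switches : List String) (argument : String) : List String → Bool
  | [] => false
  | sw :: rest =>
    if PySem.Str.startswith argument sw then true
    else if PySem.Str.len sw = 2 ∧ 2 ≤ PySem.Str.len argument ∧ argument.toList.getD 1 ' ' ≠ '-' then
      -- indices argument[1], switch[1] are safe: guarded by the two length conditions
      if pvA_charLoop short_switches (sw.toList.getD 1 ' ') (argument.toList.drop 1) then true
      else pvA_swLoop short_switches argument rest
    else pvA_swLoop short_switches argument rest

-- outer 'for argument in [a for a in arguments if a.startswith("-")]' loop
def pvA_argLoop (switches : List String) (short_switches : List String) : List String → Bool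
  | [] => false
  | a :: rest =>
    if pvA_swLoop short_switches a switches then true
    else pvA_argLoop switches short_switches rest

def is_option_switch_in_arguments (switches : List String) (short_switches : List String) (arguments : List String) : Bool :=
  pvA_argLoop switches short_switches (arguments.filter (fun a => PySem.Str.startswith a "-"))

-- ===== PORT B =====
-- Source B's 'for char in argument[1:]: if char not in short_switches: break; valid.add(char)'
def pvB_buildValid (short_switches : List String) : List Char → PySem.Set Char → PySem.Set Char
  | [], valid => valid
  | c :: cs, valid =>
    if ¬ (short_switches.contains (String.ofList [c])) then valid
    else pvB_buildValid short_switches cs (PySem.Set.add valid c)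

-- Source B's single 'for argument in arguments' loop
def pvB_loop (switches : List String) (short_switches : List String) : List String → Bool
  | [] => false
  | a :: rest =>
    if PySem.Str.startswith a "-" then
      if switches.any (fun sw => PySem.Str.startswith a sw) then true
      else if 2 ≤ PySem.Str.len a ∧ a.toList.getD 1 ' ' ≠ '-' then
        -- 'valid' (used once) is inlined here
        if switches.any (fun sw => PySem.Str.len sw == 2
            && (pvB_buildValid short_switches (a.toList.drop 1) PySem.Set.empty).contains (sw.toList.getD 1 ' ')) then true
        else pvB_loop switches short_switches rest
      else pvB_loop switches short_switches rest
    else pvB_loop switches short_switches rest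

def is_option_switch_in_arguments_alt (switches : List String) (short_switches : List String) (arguments : List String) : Bool :=
  pvB_loop switches short_switches arguments

-- ===== PRECONDITION & SPEC =====
def Spec_is_option_switch_in_arguments (switches : List String) (short_switches : List String) (arguments : List String) (out : Bool) : Prop := out = is_option_switch_in_arguments_alt switches short_switches arguments
instance (switches : List String) (short_switches : List String) (arguments : List String) (out : Bool) : Decidable (Spec_is_option_switch_in_arguments switches short_switches arguments out) := by unfold Spec_is_option_switch_in_arguments; infer_instance

-- ===== CLAIM (what is proved, stated in full; the proofs are below) =====
def Claim_equal_is_option_switch_in_arguments : Prop := ∀ (switches : List String) (short_switches : List String) (arguments : List String), Dom_is_option_switch_in_arguments switches short_switches arguments → Spec_is_option_switch_in_arguments switches short_switches arguments (is_option_switch_in_arguments switches short_switches arguments)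

-- ===== LEMMAS AND PROOFS =====

-- String.ofList on singletons is injective (Python's 1-char-string equality is Char equality)
lemma pv_ofList_singleton_inj {c x : Char} (h : String.ofList [c] = String.ofList [x]) : c = x := by
  have := congrArg String.toList h
  simpa using this

-- A's character scan hits x iff x lies in the longest prefix of recognized short-switch chars
lemma pvA_charLoop_iff (short_switches : List String) (x : Char) (cs : List Char) :
    pvA_charLoop short_switches x cs = true
      ↔ x ∈ cs.takeWhile (fun c => short_switches.contains (String.ofList [c])) := by
  induction cs with
  | nil => simp [pvA_charLoop]
  | cons c cs ih =>
    by_cases hm : short_switches.contains (String.ofList [c]) = true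
    · rw [List.takeWhile_cons_of_pos (p := fun c => short_switches.contains (String.ofList [c])) hm]
      unfold pvA_charLoop
      rw [if_neg (not_not_intro hm)]
      by_cases hx : c = x
      · subst hx
        rw [if_pos rfl]
        simp
      · rw [if_neg (fun h => hx (pv_ofList_singleton_inj h))]
        rw [ih, List.mem_cons]
        have : ¬ x = c := fun h => hx h.symm
        tauto
    · rw [List.takeWhile_cons_of_neg (p := fun c => short_switches.contains (String.ofList [c])) (by simpa using hm)]
      unfold pvA_charLoop
      rw [if_pos hm]
      simp
  
-- membership in the set B builds = membership in that same prefix (plus the accumulator)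
lemma pvB_buildValid_mem (short_switches : List String) (cs : List Char)
    (acc : PySem.Set Char) (x : Char) :
    x ∈ pvB_buildValid short_switches cs acc
      ↔ x ∈ acc ∨ x ∈ cs.takeWhile (fun c => short_switches.contains (String.ofList [c])) := by
  induction cs generalizing acc with
  | nil => simp [pvB_buildValid]
  | cons c cs ih =>
    by_cases hm : short_switches.contains (String.ofList [c]) = true
    · rw [List.takeWhile_cons_of_pos (p := fun c => short_switches.contains (String.ofList [c])) hm]
      unfold pvB_buildValid
      rw [if_neg (not_not_intro hm)]
      rw [ih, PySem.Set.mem_add, List.mem_cons]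
      tauto
    · rw [List.takeWhile_cons_of_neg (p := fun c => short_switches.contains (String.ofList [c])) (by simpa using hm)]
      unfold pvB_buildValid
      rw [if_pos hm]
      simp
  
-- what A's inner switch loop decides, as one existential over the switches
lemma pvA_swLoop_iff (short_switches : List String) (a : String) (sws : List String) :
    pvA_swLoop short_switches a sws = true
      ↔ ∃ sw ∈ sws, (PySem.Str.startswith a sw = true
          ∨ (PySem.Str.len sw = 2 ∧ 2 ≤ PySem.Str.len a ∧ a.toList.getD 1 ' ' ≠ '-'
             ∧ pvA_charLoop short_switches (sw.toList.getD 1 ' ') (a.toList.drop 1) = true)) := by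
  induction sws with
  | nil => simp [pvA_swLoop]
  | cons sw rest ih =>
    rw [List.exists_mem_cons_iff]
    unfold pvA_swLoop
    by_cases hs : PySem.Str.startswith a sw = true
    · rw [if_pos hs]
      exact ⟨fun _ => Or.inl (Or.inl hs), fun _ => rfl⟩
    · rw [if_neg hs]
      by_cases hg : (PySem.Str.len sw = 2 ∧ 2 ≤ PySem.Str.len a ∧ a.toList.getD 1 ' ' ≠ '-')
      · rw [if_pos hg]
        by_cases hc : pvA_charLoop short_switches (sw.toList.getD 1 ' ') (a.toList.drop 1) = true
        · rw [if_pos hc]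
          exact ⟨fun _ => Or.inl (Or.inr ⟨hg.1, hg.2.1, hg.2.2, hc⟩), fun _ => rfl⟩
        · rw [if_neg hc, ih]
          constructor
          · exact Or.inr
          · rintro ((h | ⟨_, _, _, h4⟩) | h)
            · exact absurd h hs
            · exact absurd h4 hc
            · exact h
      · rw [if_neg hg, ih]
        constructor
        · exact Or.inr
        · rintro ((h | ⟨h1, h2, h3, _⟩) | h)
          · exact absurd h hs
          · exact absurd ⟨h1, h2, h3⟩ hg
          · exact h
  
-- B's per-switch short test, unfolded to A's character scan
lemma pvB_short_pred_iff (short_switches : List String) (a sw : String) :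
    (PySem.Str.len sw == 2
      && (pvB_buildValid short_switches (a.toList.drop 1) PySem.Set.empty).contains
           (sw.toList.getD 1 ' ')) = true
      ↔ (PySem.Str.len sw = 2
         ∧ pvA_charLoop short_switches (sw.toList.getD 1 ' ') (a.toList.drop 1) = true) := by
  rw [Bool.and_eq_true, beq_iff_eq]
  apply and_congr_right
  intro _
  rw [PySem.Set.contains_iff, pvB_buildValid_mem, pvA_charLoop_iff]
  simp [PySem.Set.empty]
  
lemma pv_main (switches short_switches arguments : List String) :
    is_option_switch_in_arguments switches short_switches arguments
      = is_option_switch_in_arguments_alt switches short_switches arguments := by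
  unfold is_option_switch_in_arguments is_option_switch_in_arguments_alt
  induction arguments with
  | nil => simp [pvA_argLoop, pvB_loop]
  | cons a rest ih =>
    unfold pvB_loop
    by_cases hd : PySem.Str.startswith a "-" = true
    · rw [List.filter_cons_of_pos (p := fun a => PySem.Str.startswith a "-") hd]
      unfold pvA_argLoop
      rw [if_pos hd]
      by_cases hlong : (switches.any (fun sw => PySem.Str.startswith a sw)) = true
      · rw [if_pos hlong]
        rw [if_pos ((pvA_swLoop_iff short_switches a switches).mpr
          (by obtain ⟨sw, hmem, hp⟩ := List.any_eq_true.mp hlong; exact ⟨sw, hmem, Or.inl hp⟩))]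
      · rw [if_neg hlong]
        by_cases hshape : (2 ≤ PySem.Str.len a ∧ a.toList.getD 1 ' ' ≠ '-')
        · rw [if_pos hshape]
          have hlong' := fun h => hlong (List.any_eq_true.mpr h)
          by_cases hshort : (switches.any (fun sw => PySem.Str.len sw == 2
              && (pvB_buildValid short_switches (a.toList.drop 1) PySem.Set.empty).contains
                   (sw.toList.getD 1 ' '))) = true
          · rw [if_pos hshort]
            obtain ⟨sw, hmem, hp⟩ := List.any_eq_true.mp hshort
            obtain ⟨hlen, hcl⟩ := (pvB_short_pred_iff short_switches a sw).mp hp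
            rw [if_pos ((pvA_swLoop_iff short_switches a switches).mpr
              ⟨sw, hmem, Or.inr ⟨hlen, hshape.1, hshape.2, hcl⟩⟩)]
          · rw [if_neg hshort]
            have hA : ¬ pvA_swLoop short_switches a switches = true := by
              rw [pvA_swLoop_iff]
              rintro ⟨sw, hmem, h | ⟨hlen, _, _, hcl⟩⟩
              · exact hlong' ⟨sw, hmem, h⟩
              · exact hshort (List.any_eq_true.mpr
                  ⟨sw, hmem, (pvB_short_pred_iff short_switches a sw).mpr ⟨hlen, hcl⟩⟩)
            rw [if_neg hA]
            exact ih
        · rw [if_neg hshape]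
          have hA : ¬ pvA_swLoop short_switches a switches = true := by
            rw [pvA_swLoop_iff]
            rintro ⟨sw, hmem, h | ⟨_, hle, hne, _⟩⟩
            · exact hlong (List.any_eq_true.mpr ⟨sw, hmem, h⟩)
            · exact hshape ⟨hle, hne⟩
          rw [if_neg hA]
          exact ih
    · rw [List.filter_cons_of_neg (p := fun a => PySem.Str.startswith a "-") (by simpa using hd), if_neg hd]
      exact ih

-- ===== VERDICT (by name: the statement is the Claim_ definition above) =====
theorem is_option_switch_in_arguments_spec : Claim_equal_is_option_switch_in_arguments := by
  intro switches short_switches arguments _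
  unfold Spec_is_option_switch_in_arguments
  exact pv_main switches short_switches arguments
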